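-- pv_equiv track=rewrite | github.com/Enzo-Demeulenaere/M1-ACT | TP4/tp4.py | heuristique_hill_climbing_voisinage_swap
-- ===== SOURCE A (Python) =====
-- def calcul_ordonnancement(l):
--     t = 0
--     time_task_end = []
--     for i in range(len(l)):
--         t += l[i][0]
--         time_task_end.append(l[i][1] * max(t-l[i][2],0))
--     score_ordonnancement = sum(time_task_end)
--     return score_ordonnancement
--
-- def generer_paires_index(l, indice):     #fonction utilitaire
--     paires = [[indice, j] for j in range(indice + 1, len(l))]
--     return paires
--
-- def swap_amelioration_temps(l, swap, temps):
--     t = temps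
--     for j in range (len(swap)):
--         a, b = swap[j][0], swap[j][1]
--         z0, z1 = l[a], l[b]
--         l[a], l[b] = z1, z0
--         calcul = calcul_ordonnancement(l)
--         if calcul < t:
--             t = calcul
--             i0, i1 = a, b
--         l[a], l[b] = z0, z1
--     if t < temps:
--         z0, z1 = l[i0], l[i1]
--         l[i0], l[i1] = z1, z0
--         return l, t, True
--     else:
--         return l, temps, False
--
-- def heuristique_hill_climbing_voisinage_swap(l):
--     temps = calcul_ordonnancement(l)
--     i = 0
--     while i < len(l):
--         swap = generer_paires_index(l,i)
--         l, temps, boo = swap_amelioration_temps(l, swap, temps)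
--         if boo == False:
--             i += 1
--         else:
--             i == 0
--     return calcul_ordonnancement(l), l
-- ===== SOURCE B (Python) =====
-- # B: same hill-climbing loop, but each candidate swap (i,j) is scored by a
-- # prefix/segment decomposition: score = temps - seg(i..j, old order) + seg(i..j, swapped order),
-- # instead of physically swapping and re-scoring the whole list.  Mutates l in place, like A.
--
-- def _seg(t, xs):
--     """Fold a segment starting at accumulated time t; return (end_time, segment_score)."""
--     s = 0
--     for p, w, d in xs:
--         t += p
--         s += w * max(t - d, 0)
--     return t, s
--
--
-- def heuristique_hill_climbing_voisinage_swap(l):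
--     n = len(l)
--     temps = _seg(0, l)[1]
--     i = 0
--     while i < n:
--         ti = _seg(0, l[:i])[0]          # time accumulated before position i
--         best, bj = temps, -1
--         for j in range(i + 1, n):
--             mid = l[i + 1:j]
--             old = _seg(ti, [l[i]] + mid + [l[j]])[1]
--             new = _seg(ti, [l[j]] + mid + [l[i]])[1]
--             cand = temps - old + new
--             if cand < best:
--                 best, bj = cand, j
--         if bj >= 0:
--             l[i], l[bj] = l[bj], l[i]
--             temps = best
--         else:
--             i += 1
--     return _seg(0, l)[1], l
-- ===== Notes on version B (the rewrite author's own statement) =====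
-- stated objective: alternative
-- what changed: The neighbour search scores each candidate swap (i,j) incrementally as baseline - old-segment[i..j] + swapped-segment[i..j] using a prefix/segment decomposition of the schedule score, instead of physically swapping the two jobs and re-running the full scoring pass over the whole list.
import Mathlib
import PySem

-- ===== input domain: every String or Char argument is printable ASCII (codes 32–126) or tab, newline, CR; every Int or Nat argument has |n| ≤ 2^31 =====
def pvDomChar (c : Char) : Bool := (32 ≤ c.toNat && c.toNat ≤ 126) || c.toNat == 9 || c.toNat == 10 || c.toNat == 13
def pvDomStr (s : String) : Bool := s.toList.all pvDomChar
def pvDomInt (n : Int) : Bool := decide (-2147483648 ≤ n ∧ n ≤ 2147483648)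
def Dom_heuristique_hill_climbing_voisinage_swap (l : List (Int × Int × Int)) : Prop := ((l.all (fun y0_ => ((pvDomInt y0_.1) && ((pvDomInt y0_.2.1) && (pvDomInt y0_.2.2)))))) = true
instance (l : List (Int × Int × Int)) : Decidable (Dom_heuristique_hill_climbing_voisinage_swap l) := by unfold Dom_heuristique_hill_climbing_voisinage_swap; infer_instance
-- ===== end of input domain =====

-- B re-implements the neighbour search: each candidate swap (i,j) is scored incrementally as
-- baseline - old segment [i..j] + swapped segment [i..j] (prefix/segment decomposition) instead of
-- physically swapping and re-scoring the whole list (objective: alternative; equivalence is about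
-- the returned value — both Pythons also mutate l in place identically).

-- B re-implements the neighbour search: each candidate swap (i,j) is scored incrementally as
-- baseline - old segment [i..j] + swapped segment [i..j] (a prefix/segment decomposition) instead of
-- physically swapping the two jobs and re-scoring the whole list (objective: alternative; the
-- equivalence is about the returned value — both Pythons also mutate l in place identically).

-- ===== PORT A =====

-- calcul_ordonnancement: running time t, list of weighted-tardiness terms, then summed
def pvCalcul (l : List (Int × Int × Int)) : Int :=
  ((l.foldl (fun (st : Int × List Int) x =>
      (st.1 + x.1, st.2 ++ [x.2.1 * max (st.1 + x.1 - x.2.2) 0])) ((0 : Int), ([] : List Int))).2).sum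

-- generer_paires_index: [[indice, j] for j in range(indice+1, len(l))]
def pvPaires (l : List (Int × Int × Int)) (indice : Nat) : List (Nat × Nat) :=
  (List.range' (indice + 1) (l.length - (indice + 1))).map (fun j => (indice, j))

-- the in-place double assignment l[a], l[b] = l[b], l[a] (both Pythons use it)
def pvSwap (l : List (Int × Int × Int)) (a b : Nat) : List (Int × Int × Int) :=
  (l.set a (l.getD b (0,0,0))).set b (l.getD a (0,0,0))

-- swap_amelioration_temps: best improving swap, first minimum by strict <; (i0,i1) start as (0,0),
-- read only when t < temps (in Python they are then bound)
def pvSwapAmelioration (l : List (Int × Int × Int)) (swap : List (Nat × Nat)) (temps : Int) :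
    List (Int × Int × Int) × Int × Bool :=
  let st := swap.foldl (fun (st : Int × Nat × Nat) p =>
      let calcv := pvCalcul (pvSwap l p.1 p.2)
      if calcv < st.1 then (calcv, p.1, p.2) else st) (temps, 0, 0)
  if st.1 < temps then (pvSwap l st.2.1 st.2.2, st.1, true) else (l, temps, false)

-- fuel bound for the while loop (a totality guard only, never reached): every improving step strictly
-- decreases the integer score, which stays within ±M for M the sum below, and at most l.length
-- non-improving steps advance i; so 2*M + l.length + 2 steps always suffice
def pvFuel (l : List (Int × Int × Int)) : Nat :=
  2 * (l.map (fun x => x.2.1.natAbs * ((l.map (fun y => y.1.natAbs)).sum + x.2.2.natAbs))).sum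
    + l.length + 2

-- the while loop of heuristique_hill_climbing_voisinage_swap (i never resets; it stays on an improvement)
def pvLoopA (fuel : Nat) (l : List (Int × Int × Int)) (temps : Int) (i : Nat) :
    Int × List (Int × Int × Int) :=
  match fuel with
  | 0 => (pvCalcul l, l)
  | fuel+1 =>
    if i < l.length then
      match pvSwapAmelioration l (pvPaires l i) temps with
      | (l', t', false) => pvLoopA fuel l' t' (i+1)
      | (l', t', true) => pvLoopA fuel l' t' i
    else (pvCalcul l, l)

def heuristique_hill_climbing_voisinage_swap (l : List (Int × Int × Int)) : Int × (List (Int × Int × Int)) :=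
  pvLoopA (pvFuel l) l (pvCalcul l) 0

-- ===== PORT B =====

-- _seg: fold a segment starting from accumulated time t; returns (end time, segment score)
def pvSeg (t : Int) (xs : List (Int × Int × Int)) : Int × Int :=
  xs.foldl (fun (st : Int × Int) x => (st.1 + x.1, st.2 + x.2.1 * max (st.1 + x.1 - x.2.2) 0)) (t, 0)

-- B's while loop (same control flow and fuel guard as A's; slices l[:i], l[i+1:j] with these
-- in-range nonnegative bounds are exactly List.take / drop-take)
def pvLoopB (fuel : Nat) (l : List (Int × Int × Int)) (temps : Int) (i : Nat) :
    Int × List (Int × Int × Int) :=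
  match fuel with
  | 0 => ((pvSeg 0 l).2, l)
  | fuel+1 =>
    if i < l.length then
      match (List.range' (i+1) (l.length - (i+1))).foldl (fun (st : Int × Int) j =>
          let mid := (l.drop (i+1)).take (j - (i+1))
          let old := (pvSeg ((pvSeg 0 (l.take i)).1) (l.getD i (0,0,0) :: (mid ++ [l.getD j (0,0,0)]))).2
          let nw := (pvSeg ((pvSeg 0 (l.take i)).1) (l.getD j (0,0,0) :: (mid ++ [l.getD i (0,0,0)]))).2
          let c := temps - old + nw
          if c < st.1 then (c, (j : Int)) else st) (temps, -1) with
      | (best, bj) =>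
        if 0 ≤ bj then pvLoopB fuel (pvSwap l i bj.toNat) best i
        else pvLoopB fuel l temps (i+1)
    else ((pvSeg 0 l).2, l)

def heuristique_hill_climbing_voisinage_swap_alt (l : List (Int × Int × Int)) : Int × (List (Int × Int × Int)) :=
  pvLoopB (pvFuel l) l ((pvSeg 0 l).2) 0

-- ===== PRECONDITION & SPEC =====
def Spec_heuristique_hill_climbing_voisinage_swap (l : List (Int × Int × Int)) (out : Int × (List (Int × Int × Int))) : Prop := out = heuristique_hill_climbing_voisinage_swap_alt l
instance (l : List (Int × Int × Int)) (out : Int × (List (Int × Int × Int))) : Decidable (Spec_heuristique_hill_climbing_voisinage_swap l out) := by unfold Spec_heuristique_hill_climbing_voisinage_swap; infer_instance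

-- ===== CLAIM (what is proved, stated in full; the proofs are below) =====
def Claim_equal_heuristique_hill_climbing_voisinage_swap : Prop := ∀ (l : List (Int × Int × Int)), Dom_heuristique_hill_climbing_voisinage_swap l → Spec_heuristique_hill_climbing_voisinage_swap l (heuristique_hill_climbing_voisinage_swap l)

-- ===== LEMMAS AND PROOFS =====

theorem pvSeg_shift (xs : List (Int × Int × Int)) (t s : Int) :
    xs.foldl (fun (st : Int × Int) x => (st.1 + x.1, st.2 + x.2.1 * max (st.1 + x.1 - x.2.2) 0)) (t, s)
      = ((pvSeg t xs).1, s + (pvSeg t xs).2) := by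
  induction xs generalizing t s with
  | nil => simp [pvSeg]
  | cons x xs ih =>
    show List.foldl _ (t + x.1, s + x.2.1 * max (t + x.1 - x.2.2) 0) xs = _
    rw [ih]
    have hr : pvSeg t (x::xs)
        = ((pvSeg (t + x.1) xs).1, x.2.1 * max (t + x.1 - x.2.2) 0 + (pvSeg (t + x.1) xs).2) := by
      show List.foldl _ (t + x.1, 0 + x.2.1 * max (t + x.1 - x.2.2) 0) xs = _
      rw [ih]; simp
    rw [hr]
    simp
    ring

theorem pvSeg_append (t : Int) (xs ys : List (Int × Int × Int)) :
    pvSeg t (xs ++ ys)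
      = ((pvSeg (pvSeg t xs).1 ys).1, (pvSeg t xs).2 + (pvSeg (pvSeg t xs).1 ys).2) := by
  show (xs ++ ys).foldl _ (t, 0) = _
  rw [List.foldl_append]
  show List.foldl _ (pvSeg t xs) ys = _
  rw [← Prod.mk.eta (p := pvSeg t xs), pvSeg_shift]

theorem pvSeg_fst (t : Int) (xs : List (Int × Int × Int)) :
    (pvSeg t xs).1 = t + (xs.map (fun p => p.1)).sum := by
  induction xs generalizing t with
  | nil => simp [pvSeg]
  | cons x xs ih =>
    have hr : pvSeg t (x::xs)
        = ((pvSeg (t + x.1) xs).1, x.2.1 * max (t + x.1 - x.2.2) 0 + (pvSeg (t + x.1) xs).2) := by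
      show List.foldl _ (t + x.1, 0 + x.2.1 * max (t + x.1 - x.2.2) 0) xs = _
      rw [pvSeg_shift]; simp
    rw [hr]
    simp [ih]
    ring

theorem pvCalculAux (xs : List (Int × Int × Int)) (t : Int) (acc : List Int) :
    ((xs.foldl (fun (st : Int × List Int) x =>
        (st.1 + x.1, st.2 ++ [x.2.1 * max (st.1 + x.1 - x.2.2) 0])) (t, acc)).2).sum
      = acc.sum + (pvSeg t xs).2 := by
  induction xs generalizing t acc with
  | nil => simp [pvSeg]
  | cons x xs ih =>
    show ((xs.foldl _ (t + x.1, acc ++ [x.2.1 * max (t + x.1 - x.2.2) 0])).2).sum = _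
    rw [ih]
    have hr : pvSeg t (x::xs)
        = ((pvSeg (t + x.1) xs).1, x.2.1 * max (t + x.1 - x.2.2) 0 + (pvSeg (t + x.1) xs).2) := by
      show List.foldl _ (t + x.1, 0 + x.2.1 * max (t + x.1 - x.2.2) 0) xs = _
      rw [pvSeg_shift]; simp
    rw [hr]
    simp
    ring

theorem pvCalcul_eq_seg (l : List (Int × Int × Int)) : pvCalcul l = (pvSeg 0 l).2 := by
  have := pvCalculAux l 0 []
  simpa [pvCalcul] using this

theorem pvDecomp (l : List (Int × Int × Int)) (i j : Nat) (hij : i < j) (hj : j < l.length) :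
    l = l.take i ++ (l.getD i (0,0,0) ::
      ((l.drop (i+1)).take (j-(i+1)) ++ l.getD j (0,0,0) :: l.drop (j+1))) := by
  have hi : i < l.length := lt_trans hij hj
  conv_lhs => rw [← List.take_append_drop i l]
  rw [List.drop_eq_getElem_cons hi, ← List.getD_eq_getElem l (0,0,0) hi]
  congr 2
  conv_lhs => rw [← List.take_append_drop (j-(i+1)) (l.drop (i+1))]
  rw [List.drop_drop]
  have he : i + 1 + (j - (i+1)) = j := by omega
  rw [he, List.drop_eq_getElem_cons hj, ← List.getD_eq_getElem l (0,0,0) hj]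

theorem pvSwap_decomp (l : List (Int × Int × Int)) (i j : Nat) (hij : i < j) (hj : j < l.length) :
    pvSwap l i j = l.take i ++ (l.getD j (0,0,0) ::
      ((l.drop (i+1)).take (j-(i+1)) ++ l.getD i (0,0,0) :: l.drop (j+1))) := by
  have hi : i < l.length := lt_trans hij hj
  have hA : (l.take i).length = i := by simp; omega
  have s1 : l.set i (l.getD j (0,0,0)) = l.take i ++ l.getD j (0,0,0) :: l.drop (i+1) :=
    List.set_eq_take_cons_drop _ hi
  have hj2 : j < (l.take i ++ l.getD j (0,0,0) :: l.drop (i+1)).length := by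
    simp; omega
  have s3 : (l.take i ++ l.getD j (0,0,0) :: l.drop (i+1)).take j
      = l.take i ++ l.getD j (0,0,0) :: (l.drop (i+1)).take (j-(i+1)) := by
    rw [List.take_append, hA, List.take_of_length_le (by rw [hA]; omega)]
    have h1 : j - i = (j - (i+1)) + 1 := by omega
    rw [h1, List.take_succ_cons]
  have s4 : (l.take i ++ l.getD j (0,0,0) :: l.drop (i+1)).drop (j+1) = l.drop (j+1) := by
    rw [List.drop_append, List.drop_eq_nil_of_le (by rw [hA]; omega), hA]
    have h2 : j + 1 - i = (j - (i+1)) + 1 + 1 := by omega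
    rw [h2, List.drop_succ_cons, List.nil_append, List.drop_drop]
    congr 1
    omega
  unfold pvSwap
  rw [s1, List.set_eq_take_cons_drop _ hj2, s3, s4]
  simp


theorem pvCand_eq (l : List (Int × Int × Int)) (i j : Nat) (hij : i < j) (hj : j < l.length) :
    pvCalcul l
      - (pvSeg ((pvSeg 0 (l.take i)).1)
          (l.getD i (0,0,0) :: ((l.drop (i+1)).take (j-(i+1)) ++ [l.getD j (0,0,0)]))).2
      + (pvSeg ((pvSeg 0 (l.take i)).1)
          (l.getD j (0,0,0) :: ((l.drop (i+1)).take (j-(i+1)) ++ [l.getD i (0,0,0)]))).2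
    = pvCalcul (pvSwap l i j) := by
  have hdl := pvDecomp l i j hij hj
  rw [pvCalcul_eq_seg, pvCalcul_eq_seg, pvSwap_decomp l i j hij hj]
  set A := l.take i with hA
  set x := l.getD i (0,0,0) with hx
  set y := l.getD j (0,0,0) with hy
  set mid := (l.drop (i+1)).take (j-(i+1)) with hmid
  set S := l.drop (j+1) with hS
  rw [hdl]
  have e1 : x :: (mid ++ y :: S) = (x :: (mid ++ [y])) ++ S := by simp
  have e2 : y :: (mid ++ x :: S) = (y :: (mid ++ [x])) ++ S := by simp
  rw [e1, e2]
  simp only [pvSeg_append]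
  have htime : (pvSeg (pvSeg 0 A).1 (x :: (mid ++ [y]))).1
      = (pvSeg (pvSeg 0 A).1 (y :: (mid ++ [x]))).1 := by
    simp only [pvSeg_fst]
    simp
    ring
  rw [htime]
  ring

theorem pvFold_corr (l : List (Int × Int × Int)) (i : Nat) (temps : Int) (ht : temps = pvCalcul l) :
    ∀ (js : List Nat) (sa : Int × Nat × Nat) (sb : Int × Int),
    (∀ j ∈ js, i < j ∧ j < l.length) →
    (sa.1 = sb.1 ∧ sa.1 ≤ temps ∧
     (sb.2 < 0 → sa = (temps, 0, 0)) ∧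
     (0 ≤ sb.2 → sa.1 < temps ∧ sa.2.1 = i ∧ ((sa.2.2 : Int) = sb.2) ∧
        sa.1 = pvCalcul (pvSwap l i sa.2.2))) →
    (let ra := (js.map (fun j => (i, j))).foldl (fun (st : Int × Nat × Nat) p =>
        let calcv := pvCalcul (pvSwap l p.1 p.2)
        if calcv < st.1 then (calcv, p.1, p.2) else st) sa
     let rb := js.foldl (fun (st : Int × Int) j =>
        let mid := (l.drop (i+1)).take (j - (i+1))
        let old := (pvSeg ((pvSeg 0 (l.take i)).1) (l.getD i (0,0,0) :: (mid ++ [l.getD j (0,0,0)]))).2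
        let nw := (pvSeg ((pvSeg 0 (l.take i)).1) (l.getD j (0,0,0) :: (mid ++ [l.getD i (0,0,0)]))).2
        let c := temps - old + nw
        if c < st.1 then (c, (j : Int)) else st) sb
     ra.1 = rb.1 ∧ ra.1 ≤ temps ∧ (rb.2 < 0 → ra = (temps, 0, 0)) ∧
     (0 ≤ rb.2 → ra.1 < temps ∧ ra.2.1 = i ∧ ((ra.2.2 : Int) = rb.2) ∧
        ra.1 = pvCalcul (pvSwap l i ra.2.2))) := by
  intro js
  induction js with
  | nil => intro sa sb hmem hR; exact hR
  | cons j js ih =>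
    intro sa sb hmem hR
    obtain ⟨hij, hjl⟩ := hmem j (List.mem_cons_self ..)
    obtain ⟨hR1, hR2, hR3, hR4⟩ := hR
    have hcand := pvCand_eq l i j hij hjl
    have hceq : pvCalcul (pvSwap l i j)
        = temps
          - (pvSeg ((pvSeg 0 (l.take i)).1) (l.getD i (0,0,0) :: ((l.drop (i+1)).take (j-(i+1)) ++ [l.getD j (0,0,0)]))).2
          + (pvSeg ((pvSeg 0 (l.take i)).1) (l.getD j (0,0,0) :: ((l.drop (i+1)).take (j-(i+1)) ++ [l.getD i (0,0,0)]))).2 := by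
      rw [ht]; linarith
    simp only [List.map_cons, List.foldl_cons]
    by_cases hc : pvCalcul (pvSwap l i j) < sa.1
    · rw [if_pos hc, if_pos (by rw [← hceq, ← hR1]; exact hc)]
      refine ih _ _ (fun q hq => hmem q (List.mem_cons_of_mem _ hq)) ?_
      refine ⟨by dsimp; rw [← hceq], by dsimp; exact le_trans (le_of_lt hc) hR2, ?_, ?_⟩
      · intro hneg; dsimp at hneg; omega
      · intro _
        exact ⟨lt_of_lt_of_le hc hR2, rfl, rfl, rfl⟩
    · rw [if_neg hc, if_neg (by rw [← hceq, ← hR1]; exact hc)]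
      exact ih _ _ (fun q hq => hmem q (List.mem_cons_of_mem _ hq)) ⟨hR1, hR2, hR3, hR4⟩

theorem pvStep_corr (l : List (Int × Int × Int)) (temps : Int) (i : Nat)
    (ht : temps = pvCalcul l) :
    pvSwapAmelioration l (pvPaires l i) temps
      = (let rb := (List.range' (i+1) (l.length - (i+1))).foldl (fun (st : Int × Int) j =>
          let mid := (l.drop (i+1)).take (j - (i+1))
          let old := (pvSeg ((pvSeg 0 (l.take i)).1) (l.getD i (0,0,0) :: (mid ++ [l.getD j (0,0,0)]))).2
          let nw := (pvSeg ((pvSeg 0 (l.take i)).1) (l.getD j (0,0,0) :: (mid ++ [l.getD i (0,0,0)]))).2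
          let c := temps - old + nw
          if c < st.1 then (c, (j : Int)) else st) (temps, -1)
        if 0 ≤ rb.2 then (pvSwap l i rb.2.toNat, rb.1, true) else (l, temps, false)) := by
  have hmem : ∀ j ∈ List.range' (i+1) (l.length - (i+1)), i < j ∧ j < l.length := by
    intro j hj; have := List.mem_range'_1.mp hj; omega
  have hcorr := pvFold_corr l i temps ht (List.range' (i+1) (l.length - (i+1)))
    (temps, 0, 0) (temps, -1) hmem
    ⟨rfl, le_rfl, fun _ => rfl, fun h0 => absurd h0 (by norm_num)⟩
  dsimp only at hcorr
  obtain ⟨h1, h2, h3, h4⟩ := hcorr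
  unfold pvSwapAmelioration pvPaires
  dsimp only
  split_ifs with c1 c2 c2
  · obtain ⟨-, hi, hcast, -⟩ := h4 c2
    rw [hi, ← hcast, h1]
    simp only [Int.toNat_natCast]
  · exfalso
    have hra := h3 (by omega)
    rw [hra] at c1
    exact lt_irrefl _ c1
  · exfalso
    exact c1 (h4 c2).1
  · rfl

theorem pvLoop_eq : ∀ (fuel : Nat) (l : List (Int × Int × Int)) (temps : Int) (i : Nat),
    temps = pvCalcul l → pvLoopA fuel l temps i = pvLoopB fuel l temps i := by
  intro fuel
  induction fuel with
  | zero => intro l temps i ht; rw [pvLoopA, pvLoopB, pvCalcul_eq_seg]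
  | succ fuel IH =>
    intro l temps i ht
    by_cases h : i < l.length
    · simp only [pvLoopA, pvLoopB, if_pos h]
      split
      · rename_i l2 t2 heq
        rw [pvStep_corr l temps i ht] at heq
        dsimp only at heq
        split_ifs at heq with hb
        · simp at heq
        · obtain ⟨he1, he23⟩ := Prod.ext_iff.mp heq
          obtain ⟨he2, -⟩ := Prod.ext_iff.mp he23
          dsimp only at he1 he2
          rw [if_neg hb, ← he1, ← he2]
          exact IH _ _ _ ht
      · rename_i l2 t2 heq
        rw [pvStep_corr l temps i ht] at heq
        dsimp only at heq
        split_ifs at heq with hb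
        · obtain ⟨he1, he23⟩ := Prod.ext_iff.mp heq
          obtain ⟨he2, -⟩ := Prod.ext_iff.mp he23
          dsimp only at he1 he2
          have hmem : ∀ j ∈ List.range' (i+1) (l.length - (i+1)), i < j ∧ j < l.length := by
            intro j hj; have := List.mem_range'_1.mp hj; omega
          have hcorr := pvFold_corr l i temps ht (List.range' (i+1) (l.length - (i+1)))
            (temps, 0, 0) (temps, -1) hmem
            ⟨rfl, le_rfl, fun _ => rfl, fun h0 => absurd h0 (by norm_num)⟩
          dsimp only at hcorr
          obtain ⟨h1, -, -, h4⟩ := hcorr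
          obtain ⟨-, -, hcast, hcalc⟩ := h4 hb
          rw [if_pos hb, he1, he2]
          refine IH _ _ _ ?_
          rw [← he2, ← h1, hcalc, ← he1, ← hcast]
          simp only [Int.toNat_natCast]
        · simp at heq
    · simp only [pvLoopA, pvLoopB, if_neg h, pvCalcul_eq_seg]

-- ===== VERDICT (by name: the statement is the Claim_ definition above) =====
theorem heuristique_hill_climbing_voisinage_swap_spec : Claim_equal_heuristique_hill_climbing_voisinage_swap := by
  intro l _
  unfold Spec_heuristique_hill_climbing_voisinage_swap
  unfold heuristique_hill_climbing_voisinage_swap heuristique_hill_climbing_voisinage_swap_alt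
  rw [← pvCalcul_eq_seg]
  exact pvLoop_eq (pvFuel l) l (pvCalcul l) 0 rfl
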